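-- pv_equiv track=rewrite | github.com/Cycrypto/BOJ | 프로그래머스/2/468377. 힌트 스테이지/힌트 스테이지.py | solution
-- ===== SOURCE A (Python) =====
-- def solution(cost, hint):
--     final_stage = len(cost)
--     hint_storage = [0] * (final_stage + 1)
--
--     def dfs(stage, storage, score):
--         if stage == final_stage:
--             return score
--
--         hint_count = min(storage[stage], len(cost[stage]) - 1)
--
--         storage = storage.copy()
--         storage[stage] = 0
--
--         score += cost[stage][hint_count]
--
--         # 마지막 스테이지는 hint가 없음
--         if stage == final_stage - 1:
--             return score
--
--         cp_storage = storage.copy()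
--         cp_score = score + hint[stage][0]
--         for h in hint[stage][1:]:
--             cp_storage[h - 1] += 1
--
--         next_stage = stage + 1
--         return min(
--             dfs(next_stage, storage, score),
--             dfs(next_stage, cp_storage, cp_score)
--         )
--
--     return dfs(0, hint_storage, 0)
-- ===== SOURCE B (Python) =====
-- def solution(cost, hint):
--     # Breadth-first frontier over stages instead of A's recursive DFS:
--     # keep the list of (storage, score) states per stage, expand level by level, take min at the end.
--     final = len(cost)
--
--     def successors(stage, state):
--         storage, score = state
--         hint_count = min(storage[stage], len(cost[stage]) - 1)
--         score = score + cost[stage][hint_count]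
--         storage = storage.copy()
--         storage[stage] = 0
--         if stage < final - 1:
--             cp_storage = storage.copy()
--             cp_score = score + hint[stage][0]
--             for h in hint[stage][1:]:
--                 cp_storage[h - 1] += 1
--             return [(storage, score), (cp_storage, cp_score)]
--         return [(storage, score)]
--
--     states = [([0] * (final + 1), 0)]
--     for stage in range(final):
--         states = [nxt for st in states for nxt in successors(stage, st)]
--     return min((score for _, score in states), default=0)
-- ===== Notes on version B (the rewrite author's own statement) =====
-- stated objective: alternative
-- what changed: Replaces A's recursive depth-first search with an iterative breadth-first frontier: a per-stage worklist of (storage, score) states expanded level by level, with the answer taken as the minimum frontier score at the end.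
import Mathlib
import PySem

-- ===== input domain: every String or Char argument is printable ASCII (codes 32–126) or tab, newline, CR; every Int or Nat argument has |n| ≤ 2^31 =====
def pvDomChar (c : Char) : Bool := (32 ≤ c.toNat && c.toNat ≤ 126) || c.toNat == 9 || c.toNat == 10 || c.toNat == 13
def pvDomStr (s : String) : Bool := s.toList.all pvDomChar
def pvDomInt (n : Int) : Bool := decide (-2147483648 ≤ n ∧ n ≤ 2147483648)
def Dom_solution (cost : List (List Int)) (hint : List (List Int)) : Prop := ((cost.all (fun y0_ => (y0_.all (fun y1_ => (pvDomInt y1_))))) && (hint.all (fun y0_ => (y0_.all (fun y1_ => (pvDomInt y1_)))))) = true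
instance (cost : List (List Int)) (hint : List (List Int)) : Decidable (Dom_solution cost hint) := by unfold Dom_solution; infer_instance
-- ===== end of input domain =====

-- B replaces A's recursive depth-first search by a stage-by-stage frontier (worklist) of
-- (storage, score) states expanded level by level, taking the minimum score at the end
-- (objective: alternative decomposition; same exponential state count).

-- ===== PORT A =====
-- A's recursive `dfs`, with fuel n = final_stage - stage (stage kept as Int).
def dfsA (cost : List (List Int)) (hint : List (List Int)) :
    Nat → Int → List Int → Int → Int
  | 0, _, _, score => score
  | n+1, stage, storage, score =>
    let row := PySem.List.pyGetD cost stage []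
    let hintCount := min (PySem.List.pyGetD storage stage 0) (PySem.List.len row - 1)
    let storage2 := PySem.List.pySetD storage stage 0
    let score2 := score + PySem.List.pyGetD row hintCount 0
    match n with
    | 0 => score2
    | m+1 =>
      let hrow := PySem.List.pyGetD hint stage []
      let cpScore := score2 + PySem.List.pyGetD hrow 0 0
      let cpStorage := (PySem.List.slice hrow (some 1) none).foldl
        (fun st h => PySem.List.pySetD st (h - 1) (PySem.List.pyGetD st (h - 1) 0 + 1)) storage2
      min (dfsA cost hint (m+1) (stage + 1) storage2 score2)
          (dfsA cost hint (m+1) (stage + 1) cpStorage cpScore)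

def solution (cost : List (List Int)) (hint : List (List Int)) : Int :=
  dfsA cost hint cost.length 0 (List.replicate (cost.length + 1) 0) 0

-- ===== PORT B =====
-- Source B's `successors(stage, state)`.
def succB (cost : List (List Int)) (hint : List (List Int)) (final : Nat) (stage : Int)
    (p : List Int × Int) : List (List Int × Int) :=
  let row := PySem.List.pyGetD cost stage []
  let hintCount := min (PySem.List.pyGetD p.1 stage 0) (PySem.List.len row - 1)
  let score := p.2 + PySem.List.pyGetD row hintCount 0
  let storage := PySem.List.pySetD p.1 stage 0
  if stage < (final : Int) - 1 then
    let hrow := PySem.List.pyGetD hint stage []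
    let cpScore := score + PySem.List.pyGetD hrow 0 0
    let cpStorage := (PySem.List.slice hrow (some 1) none).foldl
      (fun st h => PySem.List.pySetD st (h - 1) (PySem.List.pyGetD st (h - 1) 0 + 1)) storage
    [(storage, score), (cpStorage, cpScore)]
  else
    [(storage, score)]

def solution_alt (cost : List (List Int)) (hint : List (List Int)) : Int :=
  let final := cost.length
  let states := (PySem.List.pyRange 0 (final : Int) 1).foldl
    (fun sts stage => sts.flatMap (succB cost hint final stage))
    [(List.replicate (final + 1) 0, 0)]
  match states.map Prod.snd with
  | [] => 0
  | x :: xs => xs.foldl min x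

-- ===== PRECONDITION & SPEC =====
-- Pre_ excludes exactly the inputs where Python A raises IndexError: an empty cost row
-- (cost[stage][-1] on []), a missing/empty hint row for a non-final stage (hint[stage][0]),
-- or a hint value h whose target index h-1 falls outside the storage list of length len(cost)+1.
def Pre_solution (cost : List (List Int)) (hint : List (List Int)) : Prop :=
  (∀ row ∈ cost, row ≠ []) ∧
  ∀ s < cost.length - 1, hint.getD s [] ≠ [] ∧
    ∀ x ∈ (hint.getD s []).tail, -(cost.length : Int) ≤ x ∧ x ≤ (cost.length : Int) + 1
instance (cost : List (List Int)) (hint : List (List Int)) : Decidable (Pre_solution cost hint) := by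
  unfold Pre_solution; infer_instance

def pvWitness_solution : List (List Int) × List (List Int) := ([[1, 2], [3]], [[2, 1]])

def Spec_solution (cost : List (List Int)) (hint : List (List Int)) (out : Int) : Prop := out = solution_alt cost hint
instance (cost : List (List Int)) (hint : List (List Int)) (out : Int) : Decidable (Spec_solution cost hint out) := by unfold Spec_solution; infer_instance

-- ===== CLAIM (what is proved, stated in full; the proofs are below) =====
def Claim_equal_solution : Prop := ∀ (cost : List (List Int)) (hint : List (List Int)), Dom_solution cost hint → Pre_solution cost hint → Spec_solution cost hint (solution cost hint)

-- ===== LEMMAS AND PROOFS =====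

theorem foldl_min_min (x y : Int) (l : List Int) :
    l.foldl min (min x y) = min x (l.foldl min y) := by
  induction l generalizing y with
  | nil => rfl
  | cons z l ih =>
    simp only [List.foldl_cons]
    rw [min_assoc, ih]

theorem min?_append_some (a b : List Int) (x y : Int)
    (ha : a.min? = some x) (hb : b.min? = some y) :
    (a ++ b).min? = some (min x y) := by
  cases a with
  | nil => simp [List.min?] at ha
  | cons a0 as =>
    cases b with
    | nil => simp [List.min?] at hb
    | cons b0 bs =>
      simp only [List.min?] at ha hb
      obtain rfl : List.foldl min a0 as = x := by injection ha
      obtain rfl : List.foldl min b0 bs = y := by injection hb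
      simp only [List.cons_append, List.min?, List.foldl_append, List.foldl_cons]
      rw [foldl_min_min]

-- min of the mapped flatMap is min of the per-element minima.
theorem min?_map_flatMap (f : List Int × Int → Int) (h : List Int × Int → Int)
    (g : List Int × Int → List (List Int × Int)) (l : List (List Int × Int))
    (hl : ∀ p ∈ l, ((g p).map f).min? = some (h p)) :
    ((l.flatMap g).map f).min? = (l.map h).min? := by
  induction l with
  | nil => rfl
  | cons p l ih =>
    have hp := hl p (by simp)
    cases l with
    | nil => simpa using hp
    | cons q l' =>
      have ih' := ih (fun r hr => hl r (List.mem_cons_of_mem p hr))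
      have hre : List.map f (g q) ++ List.map f (List.flatMap g l')
          = List.map f (List.flatMap g (q :: l')) := by
        simp [List.flatMap_cons]
      simp only [List.flatMap_cons, List.map_append, List.map_cons]
      rw [hre, min?_append_some _ _ _ _ hp ih']
      simp only [List.min?, List.foldl_cons]
      rw [foldl_min_min]

-- per-state: the minimum over B's successors equals A's dfs value at this stage.
theorem succBMin (cost hint : List (List Int)) (n s : Nat)
    (hfin : s + (n + 1) = cost.length) (p : List Int × Int) :
    ((succB cost hint cost.length (s : Int) p).map
        (fun q => dfsA cost hint n ((s : Int) + 1) q.1 q.2)).min?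
      = some (dfsA cost hint (n + 1) (s : Int) p.1 p.2) := by
  cases n with
  | zero =>
    have hc : ¬ ((s : Int) < (cost.length : Int) - 1) := by omega
    simp [succB, dfsA, hc, List.min?]
  | succ m =>
    have hc : (s : Int) < (cost.length : Int) - 1 := by omega
    simp [succB, dfsA, hc, List.min?]

-- frontier invariant: after expanding stages s..final-1, the minimum frontier score
-- equals the minimum of dfs applied to the current states.
theorem frontierInv (cost hint : List (List Int)) :
    ∀ (n s : Nat), s + n = cost.length →
    ∀ states : List (List Int × Int),
    (((PySem.List.pyRange (s : Int) (cost.length : Int) 1).foldl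
        (fun sts stage => sts.flatMap (succB cost hint cost.length stage)) states).map Prod.snd).min?
      = (states.map (fun p => dfsA cost hint n (s : Int) p.1 p.2)).min? := by
  intro n
  induction n with
  | zero =>
    intro s hs states
    have : (s : Int) = (cost.length : Int) := by omega
    rw [this, PySem.List.pyRange_one_eq_nil (le_refl _)]
    simp [dfsA]
  | succ n ih =>
    intro s hs states
    rw [PySem.List.pyRange_one_cons (by omega)]
    simp only [List.foldl_cons]
    have hcast : (s : Int) + 1 = ((s + 1 : Nat) : Int) := by push_cast; ring
    rw [hcast]
    rw [ih (s + 1) (by omega) (states.flatMap (succB cost hint cost.length (s : Int)))]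
    rw [← hcast]
    exact min?_map_flatMap _ _ _ states
      (fun p _ => succBMin cost hint n s (by omega) p)

theorem match_min_getD (l : List Int) :
    (match l with | [] => (0 : Int) | x :: xs => xs.foldl min x) = l.min?.getD 0 := by
  cases l <;> simp [List.min?]

-- ===== VERDICT (by name: the statement is the Claim_ definition above) =====
theorem solution_spec : Claim_equal_solution := by
  intro cost hint _ _
  unfold Spec_solution solution solution_alt
  rw [match_min_getD]
  have h := frontierInv cost hint cost.length 0 (by omega)
    [(List.replicate (cost.length + 1) 0, 0)]
  simp only [Nat.cast_zero] at h
  rw [h]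
  simp [List.min?]
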